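-- pv_equiv track=rewrite | github.com/ZWhiteTrace/gto-poker-trainer | apps/api/routers/solver.py | classify_river_card
-- ===== SOURCE A (Python) =====
-- from typing import Dict, List, Optional
--
-- def classify_river_card(
--     board: List[str],
--     river: str
-- ) -> str:
--     """Classify the river card type based on the 4-card board."""
--     river_rank = river[0].upper()
--     river_suit = river[1].lower() if len(river) > 1 else ""
--
--     board_ranks = [c[0].upper() for c in board]
--     board_suits = [c[1].lower() for c in board if len(c) > 1]
--
--     # Count suits on board
--     suit_counts: Dict[str, int] = {}
--     for s in board_suits:
--         suit_counts[s] = suit_counts.get(s, 0) + 1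
--
--     # Check for flush complete (4th card of same suit)
--     if river_suit in suit_counts and suit_counts[river_suit] >= 3:
--         return "flush_complete"
--
--     # Check for pair board (adds to existing pair or creates new pair)
--     rank_counts: Dict[str, int] = {}
--     for r in board_ranks:
--         rank_counts[r] = rank_counts.get(r, 0) + 1
--
--     if river_rank in rank_counts:
--         return "pair_board"
--
--     # Check for straight complete
--     rank_values = {"A": 14, "K": 13, "Q": 12, "J": 11, "T": 10, "9": 9, "8": 8, "7": 7, "6": 6, "5": 5, "4": 4, "3": 3, "2": 2}
--     river_value = rank_values.get(river_rank, 0)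
--     board_values = sorted([rank_values.get(r, 0) for r in board_ranks])
--
--     # Check if river completes a straight
--     all_values = sorted(set(board_values + [river_value]))
--     for i in range(len(all_values) - 4):
--         if all_values[i+4] - all_values[i] == 4:
--             return "straight_complete"
--
--     # Check for wheel (A-2-3-4-5)
--     if 14 in all_values:
--         wheel_values = [1 if v == 14 else v for v in all_values]
--         wheel_values = sorted(set(wheel_values))
--         for i in range(len(wheel_values) - 4):
--             if wheel_values[i+4] - wheel_values[i] == 4:
--                 return "straight_complete"
--
--     # Check for overcard
--     high_cards = {"A", "K", "Q", "J", "T"}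
--     if river_rank in high_cards and river_rank not in board_ranks:
--         return "overcard"
--
--     # Check for counterfeit (river pairs a low card, counterfeiting low two pairs)
--     low_cards = {"2", "3", "4", "5", "6", "7"}
--     if river_rank in low_cards:
--         # If board already has pairs, this could counterfeit
--         if any(count >= 2 for count in rank_counts.values()):
--             return "counterfeit"
--
--     return "brick"
-- ===== SOURCE B (Python) =====
-- from typing import List
--
-- _RANK_VALUES = {"A": 14, "K": 13, "Q": 12, "J": 11, "T": 10, "9": 9, "8": 8,
--                 "7": 7, "6": 6, "5": 5, "4": 4, "3": 3, "2": 2}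
--
--
-- def _has_straight(values: set) -> bool:
--     """5 consecutive rank values present?  Subset scan instead of sort+window."""
--     return any(all(x + k in values for k in range(5)) for x in range(11))
--
--
-- def classify_river_card(board: List[str], river: str) -> str:
--     """Classify the river card type based on the 4-card board."""
--     river_rank = river[0].upper()
--     river_suit = river[1].lower() if len(river) > 1 else ""
--
--     board_ranks = [c[0].upper() for c in board]
--     board_suits = [c[1].lower() for c in board if len(c) > 1]
--
--     # flush: river's suit is already three times on the board
--     if board_suits.count(river_suit) >= 3:
--         return "flush_complete"
--
--     # pair: river's rank is already on the board
--     if river_rank in board_ranks: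
--         return "pair_board"
--
--     # straight: 5 consecutive values among board+river (ace also plays low)
--     values = {_RANK_VALUES.get(r, 0) for r in board_ranks}
--     values.add(_RANK_VALUES.get(river_rank, 0))
--     if _has_straight(values):
--         return "straight_complete"
--     if 14 in values and _has_straight({1 if v == 14 else v for v in values}):
--         return "straight_complete"
--
--     # overcard (river rank is not on the board: the pair check returned)
--     if river_rank in "AKQJT":
--         return "overcard"
--
--     # counterfeit: low river rank while the board is already paired
--     if river_rank in "234567" and len(set(board_ranks)) < len(board_ranks):
--         return "counterfeit"
--
--     return "brick"
-- ===== Notes on version B (the rewrite author's own statement) =====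
-- stated objective: idiomatic
-- what changed: Dict-building count loops are replaced by direct list.count / set-size checks, and the sort+width-5-window straight detection (plus separate wheel remap pass) becomes a single subset scan of the value-set against the eleven possible 5-consecutive windows over 0..14.
import Mathlib
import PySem

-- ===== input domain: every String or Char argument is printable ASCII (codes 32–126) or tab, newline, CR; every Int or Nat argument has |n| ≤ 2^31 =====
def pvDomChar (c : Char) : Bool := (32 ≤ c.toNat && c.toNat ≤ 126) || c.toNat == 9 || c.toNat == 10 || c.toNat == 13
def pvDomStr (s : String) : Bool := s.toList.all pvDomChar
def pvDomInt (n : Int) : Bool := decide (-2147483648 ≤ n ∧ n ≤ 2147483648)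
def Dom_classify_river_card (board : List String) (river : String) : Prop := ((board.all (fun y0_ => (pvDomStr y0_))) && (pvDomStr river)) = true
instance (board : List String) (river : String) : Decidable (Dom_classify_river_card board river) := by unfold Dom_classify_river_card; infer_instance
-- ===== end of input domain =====

-- B replaces the dict-count loops by list.count / set-size checks and the sort+window
-- straight detection by a subset scan over the 5-consecutive windows (idiomatic; same cost).
-- Python's one-character rank/suit strings are modelled as Char ("" as suit = none).

-- ===== PORT A =====

-- rank_values = {"A": 14, …, "2": 2}  (shared literal table)
def pvRankValues : PySem.Dict Char Int :=
  PySem.Dict.ofList [('A', 14), ('K', 13), ('Q', 12), ('J', 11), ('T', 10), ('9', 9),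
                     ('8', 8), ('7', 7), ('6', 6), ('5', 5), ('4', 4), ('3', 3), ('2', 2)]

-- high/low-card tail (overcard / counterfeit / brick) shared by the two return paths
def pvTailA (river_rank : Char) (board_ranks : List Char) (rank_counts : PySem.Dict Char Int) : String :=
  -- if river_rank in high_cards and river_rank not in board_ranks
  if decide (river_rank ∈ PySem.Set.ofList ['A', 'K', 'Q', 'J', 'T']) && !decide (river_rank ∈ board_ranks)
  then "overcard"
  -- if river_rank in low_cards: if any(count >= 2 for count in rank_counts.values())
  else if decide (river_rank ∈ PySem.Set.ofList ['2', '3', '4', '5', '6', '7'])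
          && rank_counts.values.any (fun c => decide (2 ≤ c))
  then "counterfeit"
  else "brick"

def classify_river_card (board : List String) (river : String) : String :=
  -- river_rank = river[0].upper(); river_suit = river[1].lower() if len(river) > 1 else ""
  let river_rank : Char := PySem.Chars.upperChar (PySem.List.pyGetD river.toList 0 ' ')
  let river_suit : Option Char :=
    if 1 < river.toList.length then some (PySem.Chars.lowerChar (PySem.List.pyGetD river.toList 1 ' ')) else none
  let board_ranks : List Char := board.map (fun c => PySem.Chars.upperChar (PySem.List.pyGetD c.toList 0 ' '))
  let board_suits : List Char :=
    (board.filter (fun c => 1 < c.toList.length)).map (fun c => PySem.Chars.lowerChar (PySem.List.pyGetD c.toList 1 ' '))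
  -- suit_counts[s] = suit_counts.get(s, 0) + 1
  let suit_counts : PySem.Dict Char Int :=
    board_suits.foldl (fun d s => d.insert s (d.getD s 0 + 1)) PySem.Dict.empty
  -- if river_suit in suit_counts and suit_counts[river_suit] >= 3
  if (match river_suit with
      | some s => suit_counts.contains s && decide (3 ≤ suit_counts.getD s 0)
      | none => false) then "flush_complete"
  else
    let rank_counts : PySem.Dict Char Int :=
      board_ranks.foldl (fun d r => d.insert r (d.getD r 0 + 1)) PySem.Dict.empty
    if rank_counts.contains river_rank then "pair_board"
    else
      let river_value : Int := pvRankValues.getD river_rank 0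
      let board_values : List Int :=
        PySem.List.sorted (board_ranks.map (fun r => pvRankValues.getD r 0)) (fun v => v) false
      let all_values : List Int :=
        PySem.List.sorted (PySem.Set.ofList (board_values ++ [river_value])) (fun v => v) false
      -- for i in range(len(all_values) - 4): if all_values[i+4] - all_values[i] == 4: return …
      if (PySem.List.pyRange 0 (PySem.List.len all_values - 4) 1).any
           (fun i => PySem.List.pyGetD all_values (i + 4) 0 - PySem.List.pyGetD all_values i 0 == 4)
      then "straight_complete"
      else if (14 : Int) ∈ all_values then
        let wheel_values : List Int :=
          PySem.List.sorted (PySem.Set.ofList (all_values.map (fun v => if v = 14 then 1 else v))) (fun v => v) false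
        if (PySem.List.pyRange 0 (PySem.List.len wheel_values - 4) 1).any
             (fun i => PySem.List.pyGetD wheel_values (i + 4) 0 - PySem.List.pyGetD wheel_values i 0 == 4)
        then "straight_complete"
        else pvTailA river_rank board_ranks rank_counts
      else pvTailA river_rank board_ranks rank_counts

-- ===== PORT B =====

-- any(all(x + k in values for k in range(5)) for x in range(11))
def pvHasStraight (values : PySem.Set Int) : Bool :=
  (PySem.List.pyRange 0 11 1).any (fun x =>
    (PySem.List.pyRange 0 5 1).all (fun k => decide ((x + k) ∈ values)))

def classify_river_card_alt (board : List String) (river : String) : String :=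
  let river_rank : Char := PySem.Chars.upperChar (PySem.List.pyGetD river.toList 0 ' ')
  let river_suit : Option Char :=
    if 1 < river.toList.length then some (PySem.Chars.lowerChar (PySem.List.pyGetD river.toList 1 ' ')) else none
  let board_ranks : List Char := board.map (fun c => PySem.Chars.upperChar (PySem.List.pyGetD c.toList 0 ' '))
  let board_suits : List Char :=
    (board.filter (fun c => 1 < c.toList.length)).map (fun c => PySem.Chars.lowerChar (PySem.List.pyGetD c.toList 1 ' '))
  -- board_suits.count(river_suit) >= 3  ("" counts 0 times: none ↦ 0)
  let suitCount : Nat := match river_suit with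
    | some s => PySem.List.count board_suits s
    | none => 0
  if decide (3 ≤ suitCount) then "flush_complete"
  else if decide (river_rank ∈ board_ranks) then "pair_board"
  else
    let values : PySem.Set Int :=
      PySem.Set.add (PySem.Set.ofList (board_ranks.map (fun r => pvRankValues.getD r 0)))
        (pvRankValues.getD river_rank 0)
    if pvHasStraight values then "straight_complete"
    else if decide ((14 : Int) ∈ values)
            && pvHasStraight (PySem.Set.ofList (values.map (fun v => if v = 14 then 1 else v)))
    then "straight_complete"
    -- river_rank in "AKQJT"  (single character: list membership)
    else if decide (river_rank ∈ "AKQJT".toList) then "overcard"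
    -- river_rank in "234567" and len(set(board_ranks)) < len(board_ranks)
    else if decide (river_rank ∈ "234567".toList)
            && decide ((PySem.Set.ofList board_ranks).length < board_ranks.length)
    then "counterfeit"
    else "brick"

-- ===== PRECONDITION & SPEC =====
-- Pre_ excludes exactly the inputs where Python A raises IndexError: river[0] on an
-- empty river, or c[0] on an empty board card (B raises at the same places).
def Pre_classify_river_card (board : List String) (river : String) : Prop :=
  river ≠ "" ∧ ∀ c ∈ board, c ≠ ""
instance (board : List String) (river : String) : Decidable (Pre_classify_river_card board river) := by
  unfold Pre_classify_river_card; infer_instance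

def pvWitness_classify_river_card : List String × String := (["2h", "7d", "9c", "Kh"], "As")

def Spec_classify_river_card (board : List String) (river : String) (out : String) : Prop := out = classify_river_card_alt board river
instance (board : List String) (river : String) (out : String) : Decidable (Spec_classify_river_card board river out) := by unfold Spec_classify_river_card; infer_instance

-- ===== CLAIM (what is proved, stated in full; the proofs are below) =====
def Claim_equal_classify_river_card : Prop := ∀ (board : List String) (river : String), Dom_classify_river_card board river → Pre_classify_river_card board river → Spec_classify_river_card board river (classify_river_card board river)

-- ===== LEMMAS AND PROOFS =====


-- every rank value the table yields (0 for an unknown rank) lies in [0, 14]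
theorem pv_rank_bounds (c : Char) : 0 ≤ pvRankValues.getD c 0 ∧ pvRankValues.getD c 0 ≤ 14 := by
  rcases h : pvRankValues.get? c with _ | v
  · simp [PySem.Dict.getD_eq_get?_getD, h]
  · have hm := PySem.Dict.mem_items_of_get?_eq_some _ h
    have hi : pvRankValues.items = [('A', 14), ('K', 13), ('Q', 12), ('J', 11), ('T', 10), ('9', 9),
                     ('8', 8), ('7', 7), ('6', 6), ('5', 5), ('4', 4), ('3', 3), ('2', 2)] := by decide
    rw [hi] at hm
    rw [PySem.Dict.getD_eq_get?_getD, h]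
    simp only [List.mem_cons, List.not_mem_nil, or_false, Prod.mk.injEq] at hm
    rcases hm with ⟨_,h⟩|⟨_,h⟩|⟨_,h⟩|⟨_,h⟩|⟨_,h⟩|⟨_,h⟩|⟨_,h⟩|⟨_,h⟩|⟨_,h⟩|⟨_,h⟩|⟨_,h⟩|⟨_,h⟩|⟨_,h⟩ <;> simp [h]

-- a strictly increasing Int list grows by at least its index distance
theorem pv_mono (l : List Int) (hpw : l.Pairwise (· < ·)) :
    ∀ d i, i + d < l.length → l.getD i 0 + d ≤ l.getD (i + d) 0 := by
  have hlt := List.pairwise_iff_getElem.1 hpw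
  intro d
  induction d with
  | zero => intro i h; simp
  | succ n ih =>
    intro i h
    have h1 := ih i (by omega)
    have h2 : l.getD (i + n) 0 < l.getD (i + n + 1) 0 := by
      rw [List.getD_eq_getElem l 0 (n := i + n) (by omega),
          List.getD_eq_getElem l 0 (n := i + n + 1) (by omega)]
      exact hlt _ _ (by omega) (by omega) (by omega)
    rw [show i + (n + 1) = i + n + 1 from rfl]
    push_cast
    omega

theorem pv_getD_mem (l : List Int) (i : Nat) (h : i < l.length) : l.getD i 0 ∈ l := by
  rw [List.getD_eq_getElem l 0 h]; exact List.getElem_mem h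

-- A's window scan over a strictly increasing list finds exactly a run of 5 consecutive values
theorem pv_window_iff (l : List Int) (hpw : l.Pairwise (· < ·)) :
    ((PySem.List.pyRange 0 (PySem.List.len l - 4) 1).any
      (fun i => PySem.List.pyGetD l (i + 4) 0 - PySem.List.pyGetD l i 0 == 4)) = true
    ↔ ∃ x : Int, x ∈ l ∧ x + 1 ∈ l ∧ x + 2 ∈ l ∧ x + 3 ∈ l ∧ x + 4 ∈ l := by
  have hmono := pv_mono l hpw
  rw [List.any_eq_true]
  constructor
  · rintro ⟨i, hi, hcond⟩
    rw [PySem.List.mem_pyRange_one] at hi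
    simp only [PySem.List.len_eq] at hi
    obtain ⟨hi0, hilt⟩ := hi
    rw [PySem.List.pyGetD_eq_getElem l 0 (by omega) (by omega),
        PySem.List.pyGetD_eq_getElem l 0 (by omega) (by omega), beq_iff_eq,
        ← List.getD_eq_getElem l 0, ← List.getD_eq_getElem l 0] at hcond
    rw [show (i + 4).toNat = i.toNat + 4 from by omega] at hcond
    set n := i.toNat with hndef
    have hn4 : n + 4 < l.length := by omega
    have key : ∀ k, k ≤ 4 → l.getD (n + k) 0 = l.getD n 0 + k := by
      intro k hk
      have ha := hmono k n (by omega)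
      have hb := hmono (4 - k) (n + k) (by omega)
      rw [show n + k + (4 - k) = n + 4 from by omega] at hb
      push_cast at ha hb ⊢
      omega
    refine ⟨l.getD n 0, pv_getD_mem l n (by omega), ?_, ?_, ?_, ?_⟩
    · rw [show l.getD n 0 + 1 = l.getD n 0 + (1:Nat) from by push_cast; ring, ← key 1 (by omega)]
      exact pv_getD_mem l _ (by omega)
    · rw [show l.getD n 0 + 2 = l.getD n 0 + (2:Nat) from by push_cast; ring, ← key 2 (by omega)]
      exact pv_getD_mem l _ (by omega)
    · rw [show l.getD n 0 + 3 = l.getD n 0 + (3:Nat) from by push_cast; ring, ← key 3 (by omega)]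
      exact pv_getD_mem l _ (by omega)
    · rw [show l.getD n 0 + 4 = l.getD n 0 + (4:Nat) from by push_cast; ring, ← key 4 (by omega)]
      exact pv_getD_mem l _ (by omega)
  · rintro ⟨x, h0, h1, h2, h3, h4⟩
    obtain ⟨i0, hi0, e0⟩ := List.getElem_of_mem h0
    obtain ⟨i1, hi1, e1⟩ := List.getElem_of_mem h1
    obtain ⟨i2, hi2, e2⟩ := List.getElem_of_mem h2
    obtain ⟨i3, hi3, e3⟩ := List.getElem_of_mem h3
    obtain ⟨i4, hi4, e4⟩ := List.getElem_of_mem h4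
    rw [← List.getD_eq_getElem l 0] at e0 e1 e2 e3 e4
    have step : ∀ a b, a < l.length → b < l.length → l.getD a 0 < l.getD b 0 → a < b := by
      intro a b ha hb hab
      by_contra hc
      have := hmono (a - b) b (by omega)
      rw [show b + (a - b) = a from by omega] at this
      omega
    have t01 : i0 < i1 := step _ _ hi0 hi1 (by omega)
    have t12 : i1 < i2 := step _ _ hi1 hi2 (by omega)
    have t23 : i2 < i3 := step _ _ hi2 hi3 (by omega)
    have t34 : i3 < i4 := step _ _ hi3 hi4 (by omega)
    have hi04 : i0 + 4 < l.length := by omega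
    have hup : l.getD (i0 + 4) 0 ≤ x + 4 := by
      have := hmono (i4 - (i0 + 4)) (i0 + 4) (by omega)
      rw [show i0 + 4 + (i4 - (i0 + 4)) = i4 from by omega] at this
      omega
    have hdn : x + 4 ≤ l.getD (i0 + 4) 0 := by
      have := hmono 4 i0 (by omega)
      push_cast at this; omega
    refine ⟨(i0 : Int), ?_, ?_⟩
    · rw [PySem.List.mem_pyRange_one]
      simp only [PySem.List.len_eq]
      omega
    · rw [PySem.List.pyGetD_eq_getElem l 0 (by omega) (by omega),
          PySem.List.pyGetD_eq_getElem l 0 (by omega) (by omega), beq_iff_eq,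
          ← List.getD_eq_getElem l 0, ← List.getD_eq_getElem l 0,
          show ((i0:Int) + 4).toNat = i0 + 4 from by omega, show ((i0:Int)).toNat = i0 from by omega]
      omega

-- B's subset scan, as a proposition
theorem pv_hasStraight_iff (S : PySem.Set Int) :
    pvHasStraight S = true
    ↔ ∃ x : Int, 0 ≤ x ∧ x < 11 ∧ x ∈ S ∧ x + 1 ∈ S ∧ x + 2 ∈ S ∧ x + 3 ∈ S ∧ x + 4 ∈ S := by
  unfold pvHasStraight
  rw [List.any_eq_true]
  have h5 : PySem.List.pyRange 0 5 1 = [0, 1, 2, 3, 4] := by decide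
  constructor
  · rintro ⟨x, hx, hall⟩
    rw [PySem.List.mem_pyRange_one] at hx
    rw [h5] at hall
    simp only [List.all_cons, List.all_nil, Bool.and_true, Bool.and_eq_true, decide_eq_true_eq] at hall
    exact ⟨x, hx.1, hx.2, by simpa using hall.1, hall.2.1, hall.2.2.1, hall.2.2.2.1, hall.2.2.2.2⟩
  · rintro ⟨x, hx0, hx11, m0, m1, m2, m3, m4⟩
    refine ⟨x, PySem.List.mem_pyRange_one.2 ⟨hx0, hx11⟩, ?_⟩
    rw [h5]
    simp only [List.all_cons, List.all_nil, Bool.and_true, Bool.and_eq_true, decide_eq_true_eq]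
    exact ⟨by simpa using m0, m1, m2, m3, m4⟩

-- the master straight lemma: A's sort+window loop equals B's subset scan
theorem pv_straight_eq (l : List Int) (S : PySem.Set Int)
    (hmem : ∀ x : Int, x ∈ l ↔ x ∈ S) (hpw : l.Pairwise (· < ·))
    (hbd : ∀ x : Int, x ∈ S → 0 ≤ x ∧ x ≤ 14) :
    ((PySem.List.pyRange 0 (PySem.List.len l - 4) 1).any
      (fun i => PySem.List.pyGetD l (i + 4) 0 - PySem.List.pyGetD l i 0 == 4))
    = pvHasStraight S := by
  rw [Bool.eq_iff_iff, pv_window_iff l hpw, pv_hasStraight_iff S]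
  constructor
  · rintro ⟨x, m0, m1, m2, m3, m4⟩
    rw [hmem] at m0 m1 m2 m3 m4
    have b0 := hbd x m0
    have b4 := hbd (x + 4) m4
    exact ⟨x, by omega, by omega, m0, m1, m2, m3, m4⟩
  · rintro ⟨x, _, _, m0, m1, m2, m3, m4⟩
    exact ⟨x, (hmem x).2 m0, (hmem _).2 m1, (hmem _).2 m2, (hmem _).2 m3, (hmem _).2 m4⟩

theorem pv_not_nodup_iff (l : List Char) : ¬ l.Nodup ↔ ∃ x ∈ l, 2 ≤ l.count x := by
  rw [List.nodup_iff_count_le_one]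
  push Not
  constructor
  · rintro ⟨a, ha⟩; exact ⟨a, List.count_pos_iff.1 (by omega), by omega⟩
  · rintro ⟨a, _, h2⟩; exact ⟨a, by omega⟩

-- B's duplicate test: the dedup set is shorter exactly when the list has a repeat
theorem pv_dedup_lt_iff (l : List Char) :
    List.length (PySem.Set.ofList l) < l.length ↔ ¬ l.Nodup := by
  have hsub : List.Subperm (PySem.Set.ofList l) l := by
    apply List.Nodup.subperm (PySem.Set.nodup_ofList l)
    intro x hx; exact (PySem.Set.mem_ofList l x).1 hx
  constructor
  · intro hlt hnd
    have h2 : List.Subperm l (PySem.Set.ofList l) := by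
      apply List.Nodup.subperm hnd
      intro x hx; exact (PySem.Set.mem_ofList l x).2 hx
    have := h2.length_le; omega
  · intro hnd
    rcases Nat.lt_or_ge (List.length (PySem.Set.ofList l)) l.length with h | h
    · exact h
    · exact absurd ((hsub.perm_of_length_le h).nodup (PySem.Set.nodup_ofList l)) hnd

-- A's "any count >= 2 in the rank counter" is B's set-size test
theorem pv_counter_any (l : List Char) :
    ((PySem.Dict.counter l).values.any (fun c => decide (2 ≤ c)))
    = decide (List.length (PySem.Set.ofList l) < l.length) := by
  rw [Bool.eq_iff_iff, List.any_eq_true, decide_eq_true_iff, pv_dedup_lt_iff, pv_not_nodup_iff]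
  rw [PySem.Dict.values_eq_map_keys _ (PySem.Dict.nodup_keys_counter l) 0, PySem.Dict.keys_counter]
  constructor
  · rintro ⟨v, hv, h2⟩
    obtain ⟨k, hk, rfl⟩ := List.mem_map.1 hv
    rw [decide_eq_true_iff, PySem.Dict.getD_counter] at h2
    exact ⟨k, (PySem.Set.mem_ofList l k).1 hk, by exact_mod_cast h2⟩
  · rintro ⟨k, hk, h2⟩
    refine ⟨(PySem.Dict.counter l).getD k 0, List.mem_map.2 ⟨k, (PySem.Set.mem_ofList l k).2 hk, rfl⟩, ?_⟩
    rw [decide_eq_true_iff, PySem.Dict.getD_counter]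
    exact_mod_cast h2

-- A's suit-dict flush test is B's count test
theorem pv_flush_eq (rs : Option Char) (bss : List Char) :
    (match rs with
     | some s => (bss.foldl (fun d s => d.insert s (d.getD s 0 + 1)) (PySem.Dict.empty : PySem.Dict Char Int)).contains s
                   && decide (3 ≤ (bss.foldl (fun d s => d.insert s (d.getD s 0 + 1)) (PySem.Dict.empty : PySem.Dict Char Int)).getD s 0)
     | none => false)
    = decide (3 ≤ (match rs with | some s => PySem.List.count bss s | none => 0)) := by
  cases rs with
  | none => simp
  | some s =>
    dsimp only
    rw [PySem.Dict.foldl_insert_getD_add_one_eq_counter, PySem.Dict.contains_counter,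
        PySem.Dict.getD_counter]
    simp only [PySem.List.count_eq]
    by_cases h : 3 ≤ List.count s bss
    · have hm : s ∈ bss := List.count_pos_iff.1 (by omega)
      have h' : (3 : Int) ≤ (List.count s bss : Int) := by exact_mod_cast h
      simp [h, hm, List.contains_eq_mem, h']
    · simp only [h, decide_false]
      have : ¬ (3 ≤ (List.count s bss : Int)) := by exact_mod_cast h
      simp [this]

theorem pv_pair_eq (brs : List Char) (rr : Char) :
    (brs.foldl (fun d r => d.insert r (d.getD r 0 + 1)) (PySem.Dict.empty : PySem.Dict Char Int)).contains rr
    = decide (rr ∈ brs) := by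
  rw [PySem.Dict.foldl_insert_getD_add_one_eq_counter, PySem.Dict.contains_counter,
      List.contains_eq_mem]

-- A's tail (overcard / counterfeit / brick) equals B's, once the river rank is not on the board
theorem pv_tail_eq (rr : Char) (brs : List Char) (hnm : rr ∉ brs) :
    pvTailA rr brs (brs.foldl (fun d r => d.insert r (d.getD r 0 + 1)) (PySem.Dict.empty : PySem.Dict Char Int))
    = (if decide (rr ∈ "AKQJT".toList) then "overcard"
       else if decide (rr ∈ "234567".toList)
               && decide (List.length (PySem.Set.ofList brs) < brs.length) then "counterfeit"
       else "brick") := by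
  unfold pvTailA
  rw [PySem.Dict.foldl_insert_getD_add_one_eq_counter, pv_counter_any]
  have hhigh : ("AKQJT".toList) = ['A', 'K', 'Q', 'J', 'T'] := rfl
  have hlow : ("234567".toList) = ['2', '3', '4', '5', '6', '7'] := rfl
  rw [hhigh, hlow]
  simp [PySem.Set.mem_ofList, hnm]


-- ===== VERDICT (by name: the statement is the Claim_ definition above) =====
theorem classify_river_card_spec : Claim_equal_classify_river_card := by
  intro board river hDom hPre
  unfold Spec_classify_river_card classify_river_card classify_river_card_alt
  dsimp only
  set rr := PySem.Chars.upperChar (PySem.List.pyGetD river.toList 0 ' ') with hrr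
  set brs := board.map (fun c => PySem.Chars.upperChar (PySem.List.pyGetD c.toList 0 ' ')) with hbrs
  set bss := (board.filter (fun c => 1 < c.toList.length)).map
      (fun c => PySem.Chars.lowerChar (PySem.List.pyGetD c.toList 1 ' ')) with hbss
  set rs := (if 1 < river.toList.length
             then some (PySem.Chars.lowerChar (PySem.List.pyGetD river.toList 1 ' ')) else none) with hrs
  rw [pv_flush_eq rs bss, pv_pair_eq brs rr]
  refine if_congr Iff.rfl rfl ?_
  by_cases hp : rr ∈ brs
  · simp [hp]
  · simp only [hp, decide_false, Bool.false_eq_true, if_false]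
    set vals := brs.map (fun r => pvRankValues.getD r 0) with hvals
    set rv := pvRankValues.getD rr 0 with hrvdef
    set S := PySem.Set.add (PySem.Set.ofList vals) rv with hS
    set l := PySem.List.sorted
        (PySem.Set.ofList (PySem.List.sorted vals (fun v => v) false ++ [rv])) (fun v => v) false with hl
    have hmemS : ∀ x : Int, x ∈ l ↔ x ∈ S := by
      intro x
      rw [hl, hS]
      simp [PySem.List.mem_sorted, PySem.Set.mem_ofList, List.mem_append, PySem.Set.mem_add]
    have hbdS : ∀ x : Int, x ∈ S → 0 ≤ x ∧ x ≤ 14 := by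
      intro x hx
      rw [hS, PySem.Set.mem_add] at hx
      rcases hx with hx | rfl
      · rw [PySem.Set.mem_ofList, hvals] at hx
        obtain ⟨r, _, rfl⟩ := List.mem_map.1 hx
        exact pv_rank_bounds r
      · exact pv_rank_bounds rr
    have hpwl : l.Pairwise (· < ·) := by rw [hl]; exact PySem.List.sorted_ofList_pairwise_lt _
    rw [pv_straight_eq l S hmemS hpwl hbdS]
    refine if_congr Iff.rfl rfl ?_
    set SW := PySem.Set.ofList (S.map (fun v => if v = 14 then 1 else v)) with hSW
    set lW := PySem.List.sorted
        (PySem.Set.ofList (l.map (fun v => if v = 14 then 1 else v))) (fun v => v) false with hlW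
    have hmemW : ∀ x : Int, x ∈ lW ↔ x ∈ SW := by
      intro x
      rw [hlW, hSW]
      simp only [PySem.List.mem_sorted, PySem.Set.mem_ofList, List.mem_map]
      constructor
      · rintro ⟨v, hv, rfl⟩; exact ⟨v, (hmemS v).1 hv, rfl⟩
      · rintro ⟨v, hv, rfl⟩; exact ⟨v, (hmemS v).2 hv, rfl⟩
    have hbdW : ∀ x : Int, x ∈ SW → 0 ≤ x ∧ x ≤ 14 := by
      intro x hx
      rw [hSW, PySem.Set.mem_ofList] at hx
      obtain ⟨v, hv, rfl⟩ := List.mem_map.1 hx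
      have := hbdS v hv
      split_ifs <;> omega
    have hpwW : lW.Pairwise (· < ·) := by rw [hlW]; exact PySem.List.sorted_ofList_pairwise_lt _
    have htail := pv_tail_eq rr brs hp
    rw [pv_straight_eq lW SW hmemW hpwW hbdW]
    by_cases h14 : (14 : Int) ∈ S
    · rw [if_pos ((hmemS 14).2 h14)]
      simp only [decide_eq_true h14, Bool.true_and]
      exact if_congr Iff.rfl rfl htail
    · rw [if_neg (fun h => h14 ((hmemS 14).1 h))]
      simp only [decide_eq_false h14, Bool.false_and, Bool.false_eq_true, if_false]
      exact htail
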